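-- pv_equiv track=rewrite | github.com/badubidabambirimbum/Ya_Training_5 | ДЗ4/G.py | precalculation
-- ===== SOURCE A (Python) =====
-- def precalculation(matrix,n,m):
--     matrix_left = [[0] * m for i in range(n)]
--     matrix_right = [[0] * m for i in range(n)]
--
--     for i in range(n):
--         last = 0
--         for j in range(m):
--             if matrix[i][j] == "#":
--                 matrix_left[i][j] = last + 1
--                 last += 1
--             else:
--                 last = 0
--
--     for i in range(n-1,-1,-1):
--         last = 0
--         for j in range(m-1,-1,-1):
--             if matrix[i][j] == "#":
--                 matrix_right[i][j] = last + 1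
--                 last += 1
--             else:
--                 last = 0
--
--     return matrix_left, matrix_right
-- ===== SOURCE B (Python) =====
-- def precalculation(matrix, n, m):
--     # Build both tables per row in ONE forward pass by detecting maximal '#' runs
--     # and emitting their left/right counts run-by-run.
--     left, right = [], []
--     for i in range(n):
--         row = matrix[i]
--         L, R = [], []
--         j = 0
--         while j < m:
--             if row[j] == "#":
--                 k = 1
--                 while j + k < m and row[j + k] == "#":
--                     k += 1
--                 L.extend(range(1, k + 1))
--                 R.extend(range(k, 0, -1))
--                 j += k
--             else:
--                 L.append(0)
--                 R.append(0)
--                 j += 1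
--         left.append(L)
--         right.append(R)
--     return left, right
-- ===== Notes on version B (the rewrite author's own statement) =====
-- stated objective: alternative
-- what changed: B replaces A's two opposite-direction accumulator sweeps (writing into preallocated zero tables) by a single forward pass per row that segments the row into maximal '#' runs and emits both tables' entries run-by-run (1..k and k..1), building the output lists by appending.
-- outside the precondition, e.g. on precalculation([['#']], 2, 0): A returns ([[], []], [[], []]), B raises IndexError
import Mathlib
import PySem

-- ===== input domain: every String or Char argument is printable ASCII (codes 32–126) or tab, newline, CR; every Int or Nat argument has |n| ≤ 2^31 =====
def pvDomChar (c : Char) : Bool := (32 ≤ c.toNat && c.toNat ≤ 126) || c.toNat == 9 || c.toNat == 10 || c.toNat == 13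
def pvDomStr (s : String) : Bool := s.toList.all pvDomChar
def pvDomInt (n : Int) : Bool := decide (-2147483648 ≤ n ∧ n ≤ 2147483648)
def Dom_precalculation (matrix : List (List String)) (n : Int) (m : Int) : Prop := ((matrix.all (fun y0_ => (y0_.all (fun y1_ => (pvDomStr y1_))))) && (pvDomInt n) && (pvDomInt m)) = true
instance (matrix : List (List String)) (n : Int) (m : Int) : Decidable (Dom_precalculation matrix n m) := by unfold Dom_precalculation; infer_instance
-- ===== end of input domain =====

-- B re-implements A's two opposite-direction accumulator sweeps as one forward
-- pass per row that segments the row into maximal '#' runs and emits both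
-- tables run-by-run; same cost, different decomposition ("alternative").

-- ===== PORT A =====
def precalculation (matrix : List (List String)) (n : Int) (m : Int) : List (List Int) × List (List Int) :=
  let ml := (PySem.List.pyRange 0 n 1).map (fun _ => List.replicate m.toNat (0 : Int))
  let mr := (PySem.List.pyRange 0 n 1).map (fun _ => List.replicate m.toNat (0 : Int))
  let ml := (PySem.List.pyRange 0 n 1).foldl (fun ml i =>
      ((PySem.List.pyRange 0 m 1).foldl (fun (st : List (List Int) × Int) j =>
        if PySem.List.pyGetD (PySem.List.pyGetD matrix i []) j "" == "#" then
          (PySem.List.pySetD st.1 i (PySem.List.pySetD (PySem.List.pyGetD st.1 i []) j (st.2 + 1)), st.2 + 1)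
        else (st.1, 0)) (ml, (0 : Int))).1) ml
  let mr := (PySem.List.pyRange (n-1) (-1) (-1)).foldl (fun mr i =>
      ((PySem.List.pyRange (m-1) (-1) (-1)).foldl (fun (st : List (List Int) × Int) j =>
        if PySem.List.pyGetD (PySem.List.pyGetD matrix i []) j "" == "#" then
          (PySem.List.pySetD st.1 i (PySem.List.pySetD (PySem.List.pyGetD st.1 i []) j (st.2 + 1)), st.2 + 1)
        else (st.1, 0)) (mr, (0 : Int))).1) mr
  (ml, mr)

-- ===== PORT B =====
-- length of the leading run of "#" (Source B's inner `while … row[j+k] == "#"` scan)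
def runLen : List String → Nat
  | [] => 0
  | c :: cs => if c == "#" then runLen cs + 1 else 0

-- one row: segment into maximal '#' runs, emit 1..k / k..1 per run, 0/0 otherwise
def fillRow : List String → List Int × List Int
  | [] => ([], [])
  | c :: cs =>
    if c == "#" then
      let k := runLen cs + 1
      let rest := fillRow (cs.drop (runLen cs))
      ((List.range k).map (fun (t : Nat) => (t : Int) + 1) ++ rest.1,
       (List.range k).map (fun (t : Nat) => (k : Int) - (t : Int)) ++ rest.2)
    else
      let rest := fillRow cs
      (0 :: rest.1, 0 :: rest.2)
termination_by l => l.length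
decreasing_by
  · simp
  · simp

def precalculation_alt (matrix : List (List String)) (n : Int) (m : Int) : List (List Int) × List (List Int) :=
  let rows := (matrix.take n.toNat).map (fun row => fillRow (row.take m.toNat))
  (rows.map (·.1), rows.map (·.2))

-- ===== PRECONDITION & SPEC =====
-- Pre_ excludes the inputs where matrix[i][j] indexing raises IndexError in A or B:
-- n beyond the number of rows, or some of the first n rows shorter than a positive m.
-- When m <= 0 and n exceeds the row count, A never indexes and returns n empty rows,
-- but B's eager `row = matrix[i]` raises IndexError there, so those inputs stay excluded.
def Pre_precalculation (matrix : List (List String)) (n : Int) (m : Int) : Prop :=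
  n ≤ (matrix.length : Int) ∧ ∀ row ∈ matrix.take n.toNat, m ≤ (row.length : Int)
instance (matrix : List (List String)) (n : Int) (m : Int) : Decidable (Pre_precalculation matrix n m) := by unfold Pre_precalculation; infer_instance

def pvWitness_precalculation : List (List String) × Int × Int := ([["#", "#", "."], [".", "#", "#"]], 2, 3)

def Spec_precalculation (matrix : List (List String)) (n : Int) (m : Int) (out : List (List Int) × List (List Int)) : Prop := out = precalculation_alt matrix n m
instance (matrix : List (List String)) (n : Int) (m : Int) (out : List (List Int) × List (List Int)) : Decidable (Spec_precalculation matrix n m out) := by unfold Spec_precalculation; infer_instance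

-- ===== CLAIM (what is proved, stated in full; the proofs are below) =====
def Claim_equal_precalculation : Prop := ∀ (matrix : List (List String)) (n : Int) (m : Int), Dom_precalculation matrix n m → Pre_precalculation matrix n m → Spec_precalculation matrix n m (precalculation matrix n m)

-- ===== LEMMAS AND PROOFS =====

-- A's inner-loop step, on the full table (row i) and on a single row
def mstep (matrix : List (List String)) (i : Int) (st : List (List Int) × Int) (j : Int) : List (List Int) × Int :=
  if PySem.List.pyGetD (PySem.List.pyGetD matrix i []) j "" == "#" then
    (PySem.List.pySetD st.1 i (PySem.List.pySetD (PySem.List.pyGetD st.1 i []) j (st.2 + 1)), st.2 + 1)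
  else (st.1, 0)

def rstep (q : List String) (st : List Int × Int) (j : Int) : List Int × Int :=
  if PySem.List.pyGetD q j "" == "#" then (PySem.List.pySetD st.1 j (st.2 + 1), st.2 + 1)
  else (st.1, 0)

-- reference row specs
def leftGo : Int → List String → List Int
  | _, [] => []
  | l, c :: cs => if c == "#" then (l + 1) :: leftGo (l + 1) cs else 0 :: leftGo 0 cs

def lastL : Int → List String → Int
  | l, [] => l
  | l, c :: cs => if c == "#" then lastL (l + 1) cs else lastL 0 cs

def rightRow : List String → List Int
  | [] => []
  | c :: cs => if c == "#" then ((runLen cs : Int) + 1) :: rightRow cs else 0 :: rightRow cs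

lemma leftGo_length (p : List String) : ∀ l, (leftGo l p).length = p.length := by
  induction p with
  | nil => intro l; rfl
  | cons c cs ih => intro l; by_cases h : c == "#" <;> simp [leftGo, h, ih]

lemma leftGo_snoc (xs : List String) (c : String) : ∀ l,
    leftGo l (xs ++ [c]) = leftGo l xs ++ [if c == "#" then lastL l xs + 1 else 0] := by
  induction xs with
  | nil => intro l; by_cases h : c == "#" <;> simp [leftGo, lastL, h]
  | cons x xs ih => intro l; by_cases h : x == "#" <;> simp [leftGo, lastL, h, ih]

lemma lastL_snoc (xs : List String) (c : String) : ∀ l,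
    lastL l (xs ++ [c]) = if c == "#" then lastL l xs + 1 else 0 := by
  induction xs with
  | nil => intro l; by_cases h : c == "#" <;> simp [lastL, h]
  | cons x xs ih => intro l; by_cases h : x == "#" <;> simp [lastL, h, ih]

lemma getD_append_cons {α : Type} (A : List α) (v : α) (t : List α) (d : α) :
    (A ++ v :: t).getD A.length d = v := by
  simp [List.getD_eq_getElem?_getD]

lemma set_append_cons {α : Type} (A : List α) (v : α) (t : List α) (w : α) :
    (A ++ v :: t).set A.length w = A ++ w :: t := by
  simp

-- factor the inner fold through row i of the table
lemma mstep_factor (matrix : List (List String)) (i : Int) (js : List Int) :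
    ∀ (ml : List (List Int)) (l : Int), 0 ≤ i → i.toNat < ml.length →
    js.foldl (mstep matrix i) (ml, l) =
      (ml.set i.toNat ((js.foldl (rstep (PySem.List.pyGetD matrix i [])) (ml.getD i.toNat [], l)).1),
       (js.foldl (rstep (PySem.List.pyGetD matrix i [])) (ml.getD i.toNat [], l)).2) := by
  induction js with
  | nil =>
    intro ml l h0 hi
    simp [List.getD_eq_getElem?_getD, hi]
  | cons j js ih =>
    intro ml l h0 hi
    have hgd : PySem.List.pyGetD ml i [] = ml.getD i.toNat [] := by
      rw [PySem.List.pyGetD_eq_getElem ml [] h0 (by omega)]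
      simp [List.getD_eq_getElem?_getD, hi]
    have hset : ∀ v : List Int, PySem.List.pySetD ml i v = ml.set i.toNat v := fun v =>
      PySem.List.pySetD_of_nonneg ml v h0
    simp only [List.foldl_cons, mstep, rstep, hgd]
    by_cases hc : PySem.List.pyGetD (PySem.List.pyGetD matrix i []) j "" == "#"
    · simp only [hc, if_true, hset]
      rw [ih _ _ h0 (by simpa using hi)]
      simp [List.set_set, List.getD_eq_getElem?_getD, hi]
    · simp only [hc, Bool.false_eq_true, if_false]
      rw [ih _ _ h0 hi]

-- outer fold, forward over rows
lemma outer_fwd (matrix : List (List String)) (m : Int) : ∀ (K : Nat) (init : Nat → List Int) (tail : List (List Int)),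
    (((List.range K).map Int.ofNat).foldl
      (fun ml i => ((PySem.List.pyRange 0 m 1).foldl (mstep matrix i) (ml, 0)).1)
      ((List.range K).map init ++ tail))
    = (List.range K).map (fun (k : Nat) => ((PySem.List.pyRange 0 m 1).foldl (rstep (PySem.List.pyGetD matrix (k : Int) [])) (init k, 0)).1) ++ tail := by
  intro K
  induction K with
  | zero => intro init tail; simp
  | succ K ih =>
    intro init tail
    rw [List.range_succ, List.map_append, List.map_append, List.foldl_append, List.append_assoc]
    simp only [List.map_cons, List.map_nil, List.foldl_cons, List.foldl_nil, List.singleton_append]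
    rw [ih init (init K :: tail)]
    simp only [Int.ofNat_eq_natCast]
    rw [mstep_factor matrix (K : Int) (PySem.List.pyRange 0 m 1) _ 0
      (Int.natCast_nonneg K) (by simp)]
    simp only [Int.toNat_natCast]
    set A := (List.range K).map (fun (k : Nat) =>
        ((PySem.List.pyRange 0 m 1).foldl (rstep (PySem.List.pyGetD matrix (k : Int) [])) (init k, 0)).1) with hA
    have hAlen : A.length = K := by simp [hA]
    have h1 : (A ++ init K :: tail).getD K [] = init K := by
      have h := getD_append_cons A (init K) tail ([] : List Int); rwa [hAlen] at h
    have h2 : ∀ w, (A ++ init K :: tail).set K w = A ++ w :: tail := by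
      intro w; have h := set_append_cons A (init K) tail w; rwa [hAlen] at h
    rw [h1, h2, List.map_append]
    simp [hA]

-- outer fold, backward over rows
lemma outer_rev (matrix : List (List String)) (m : Int) : ∀ (K : Nat) (init : Nat → List Int) (tail : List (List Int)),
    ((((List.range K).map Int.ofNat).reverse).foldl
      (fun ml i => ((PySem.List.pyRange (m-1) (-1) (-1)).foldl (mstep matrix i) (ml, 0)).1)
      ((List.range K).map init ++ tail))
    = (List.range K).map (fun (k : Nat) => ((PySem.List.pyRange (m-1) (-1) (-1)).foldl (rstep (PySem.List.pyGetD matrix (k : Int) [])) (init k, 0)).1) ++ tail := by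
  intro K
  induction K with
  | zero => intro init tail; simp
  | succ K ih =>
    intro init tail
    rw [List.range_succ, List.map_append, List.map_append, List.reverse_append]
    simp only [List.map_cons, List.map_nil, List.reverse_cons, List.reverse_nil, List.nil_append,
      List.singleton_append, List.foldl_cons]
    simp only [Int.ofNat_eq_natCast]
    rw [mstep_factor matrix (K : Int) (PySem.List.pyRange (m-1) (-1) (-1)) _ 0
      (Int.natCast_nonneg K) (by simp)]
    simp only [Int.toNat_natCast]
    set B := (List.range K).map init with hB
    have hBlen : B.length = K := by simp [hB]
    have h1 : (B ++ init K :: tail).getD K [] = init K := by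
      have h := getD_append_cons B (init K) tail ([] : List Int); rwa [hBlen] at h
    have h2 : ∀ w, (B ++ init K :: tail).set K w = B ++ w :: tail := by
      intro w; have h := set_append_cons B (init K) tail w; rwa [hBlen] at h
    rw [List.append_assoc, List.singleton_append, h1, h2, hB, ih init _, List.map_append]
    simp

-- the forward row scan computes leftGo
lemma row_fwd (q : List String) : ∀ (M' M : Nat), M' ≤ M → M' ≤ q.length →
    ((List.range M').map Int.ofNat).foldl (rstep q) (List.replicate M (0 : Int), 0)
    = (leftGo 0 (q.take M') ++ List.replicate (M - M') (0 : Int), lastL 0 (q.take M')) := by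
  intro M'
  induction M' with
  | zero => intro M _ _; simp [leftGo, lastL]
  | succ M' ih =>
    intro M h1 h2
    rw [List.range_succ, List.map_append, List.foldl_append]
    simp only [List.map_cons, List.map_nil, List.foldl_cons, List.foldl_nil]
    rw [ih M (by omega) (by omega)]
    have hlt : M' < q.length := by omega
    have htake : q.take (M' + 1) = q.take M' ++ [q[M']] := by
      rw [List.take_add_one]; simp [List.getElem?_eq_getElem hlt]
    have hlen : (leftGo 0 (q.take M')).length = M' := by
      rw [leftGo_length, List.length_take]; omega
    have hrep : M - M' = (M - (M' + 1)) + 1 := by omega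
    unfold rstep
    simp only [Int.ofNat_eq_natCast, PySem.List.pyGetD_natCast, PySem.List.pySetD_natCast,
      List.getD_eq_getElem?_getD, List.getElem?_eq_getElem hlt, Option.getD_some]
    by_cases hc : q[M'] == "#"
    · simp only [hc, if_true]
      have hset := set_append_cons (leftGo 0 (q.take M')) (0 : Int)
        (List.replicate (M - (M' + 1)) (0 : Int)) (lastL 0 (q.take M') + 1)
      rw [hlen] at hset
      rw [hrep, List.replicate_succ, hset, htake, leftGo_snoc, lastL_snoc]
      simp [hc]
    · simp only [hc, Bool.false_eq_true, if_false]
      rw [htake, leftGo_snoc, lastL_snoc]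
      simp only [hc, Bool.false_eq_true, if_false]
      rw [hrep, List.replicate_succ]
      simp

-- the backward row scan computes rightRow
lemma row_bwd (q : List String) (M : Nat) (hM : M ≤ q.length) : ∀ (t M' : Nat), M' + t = M →
    (((List.range' M' t).map Int.ofNat).reverse).foldl (rstep q) (List.replicate M (0 : Int), 0)
    = (List.replicate M' (0 : Int) ++ rightRow ((q.take M).drop M'), (runLen ((q.take M).drop M') : Int)) := by
  intro t
  induction t with
  | zero =>
    intro M' h
    have hd : (q.take M).drop M' = [] := by
      apply List.drop_eq_nil_of_le; rw [List.length_take]; omega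
    simp [hd, rightRow, runLen]
    omega
  | succ t ih =>
    intro M' h
    have hlt : M' < q.length := by omega
    have hplen : (q.take M).length = M := by rw [List.length_take]; omega
    have hltp : M' < (q.take M).length := by omega
    rw [List.range'_succ, List.map_cons, List.reverse_cons, List.foldl_append]
    rw [ih (M' + 1) (by omega)]
    simp only [List.foldl_cons, List.foldl_nil]
    have hdrop : (q.take M).drop M' = (q.take M)[M'] :: (q.take M).drop (M' + 1) :=
      List.drop_eq_getElem_cons hltp
    have hget : (q.take M)[M']'hltp = q[M']'hlt := List.getElem_take
    unfold rstep
    simp only [Int.ofNat_eq_natCast, PySem.List.pyGetD_natCast, PySem.List.pySetD_natCast,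
      List.getD_eq_getElem?_getD, List.getElem?_eq_getElem hlt, Option.getD_some]
    have hsplit : List.replicate (M' + 1) (0 : Int) ++ rightRow ((q.take M).drop (M' + 1))
        = List.replicate M' (0 : Int) ++ 0 :: rightRow ((q.take M).drop (M' + 1)) := by
      rw [List.replicate_succ', List.append_assoc, List.singleton_append]
    by_cases hc : q[M']'hlt == "#"
    · simp only [hc, if_true, hsplit]
      have hset := set_append_cons (List.replicate M' (0 : Int)) (0 : Int)
        (rightRow ((q.take M).drop (M' + 1))) ((runLen ((q.take M).drop (M' + 1)) : Int) + 1)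
      rw [List.length_replicate] at hset
      rw [hset, hdrop, hget]
      simp [rightRow, runLen, hc]
    · simp only [hc, Bool.false_eq_true, if_false, hsplit]
      rw [hdrop, hget]
      simp [rightRow, runLen, hc]

lemma leftGo_run (cs : List String) : ∀ l,
    leftGo l cs = (List.range (runLen cs)).map (fun (t : Nat) => l + 1 + (t : Int)) ++ leftGo 0 (cs.drop (runLen cs)) := by
  induction cs with
  | nil => intro l; simp [leftGo, runLen]
  | cons c cs ih =>
    intro l
    by_cases h : c == "#"
    · have hr : runLen (c :: cs) = runLen cs + 1 := by simp [runLen, h]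
      simp only [leftGo, h, if_true, hr, List.range_succ_eq_map, List.map_cons, List.map_map,
        List.drop_succ_cons, List.cons_append]
      rw [ih (l + 1)]
      congr 1
      · push_cast; ring
      · congr 1
        apply List.map_congr_left
        intro t _
        simp [Function.comp]
        ring
    · simp [leftGo, runLen, h]

lemma rightRow_run (cs : List String) :
    rightRow cs = (List.range (runLen cs)).map (fun (t : Nat) => (runLen cs : Int) - (t : Int)) ++ rightRow (cs.drop (runLen cs)) := by
  induction cs with
  | nil => simp [rightRow, runLen]
  | cons c cs ih =>
    by_cases h : c == "#"
    · have hr : runLen (c :: cs) = runLen cs + 1 := by simp [runLen, h]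
      simp only [rightRow, h, if_true, hr, List.range_succ_eq_map, List.map_cons, List.map_map,
        List.drop_succ_cons, List.cons_append]
      rw [ih]
      refine List.cons_eq_cons.mpr ⟨by push_cast; ring, ?_⟩
      congr 1
      apply List.map_congr_left
      intro t _
      simp only [Function.comp_apply]
      push_cast; ring
    · simp [rightRow, runLen, h]

lemma fillRow_eq (p : List String) : fillRow p = (leftGo 0 p, rightRow p) := by
  induction p using fillRow.induct with
  | case1 => simp [fillRow, leftGo, rightRow]
  | case2 c cs h ih =>
    have hr : runLen (c :: cs) = runLen cs + 1 := by simp [runLen, h]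
    rw [fillRow]
    simp only [h, if_true]
    rw [ih]
    rw [leftGo_run (c :: cs) 0, rightRow_run (c :: cs)]
    simp only [hr, List.drop_succ_cons]
    simp only [Prod.mk.injEq]
    refine ⟨?_, ?_⟩
    · congr 1
      apply List.map_congr_left
      intro t _
      push_cast; ring
    · trivial
  | case3 c cs h ih =>
    rw [fillRow]
    simp only [h, Bool.false_eq_true, if_false]
    rw [ih]
    simp [leftGo, rightRow, h]

-- ===== VERDICT (by name: the statement is the Claim_ definition above) =====
lemma take_eq_map_range {α : Type} (xs : List α) (N : Nat) (d : α) (h : N ≤ xs.length) :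
    xs.take N = (List.range N).map (fun k => xs.getD k d) := by
  apply List.ext_getElem (by simp; omega)
  intro i h1 h2
  have hi : i < N := by simpa using h2
  have hix : i < xs.length := by omega
  simp [List.getD_eq_getElem?_getD, List.getElem?_eq_getElem hix, List.getElem_take]

theorem precalculation_spec : Claim_equal_precalculation := by
  unfold Claim_equal_precalculation
  intro matrix n m _ hpre
  obtain ⟨hn, hrows⟩ := hpre
  unfold Spec_precalculation
  have hNlen : n.toNat ≤ matrix.length := by omega
  have hrowlen : ∀ k : Nat, k < n.toNat → m.toNat ≤ (matrix.getD k []).length := by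
    intro k hk
    have hkx : k < matrix.length := by omega
    have htk : k < (matrix.take n.toNat).length := by simp; omega
    have hmem : matrix.getD k [] ∈ matrix.take n.toNat := by
      have hg : (matrix.take n.toNat)[k]'htk = matrix[k]'hkx := List.getElem_take
      have : matrix.getD k [] = matrix[k]'hkx := by
        simp [List.getD_eq_getElem?_getD, List.getElem?_eq_getElem hkx]
      rw [this, ← hg]
      exact List.getElem_mem htk
    have := hrows _ hmem
    omega
  have hrange : ∀ z : Int, PySem.List.pyRange 0 z 1 = (List.range z.toNat).map Int.ofNat := by
    intro z
    rw [PySem.List.pyRange_one]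
    simp [Int.ofNat_eq_natCast]
  have hrange2 : ∀ z : Int, PySem.List.pyRange (z - 1) (-1) (-1) = ((List.range z.toNat).map Int.ofNat).reverse := by
    intro z
    rw [PySem.List.pyRange_neg_one_eq_reverse]
    norm_num
    rw [hrange]
  unfold precalculation precalculation_alt
  dsimp only
  rw [hrange n, hrange2 n]
  rw [show (fun (ml : List (List Int)) (i : Int) =>
        ((PySem.List.pyRange 0 m 1).foldl (fun (st : List (List Int) × Int) (j : Int) =>
          if PySem.List.pyGetD (PySem.List.pyGetD matrix i []) j "" == "#" then
            (PySem.List.pySetD st.1 i (PySem.List.pySetD (PySem.List.pyGetD st.1 i []) j (st.2 + 1)), st.2 + 1)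
          else (st.1, 0)) (ml, (0 : Int))).1)
      = (fun (ml : List (List Int)) (i : Int) => ((PySem.List.pyRange 0 m 1).foldl (mstep matrix i) (ml, 0)).1) from rfl]
  rw [show (fun (mr : List (List Int)) (i : Int) =>
        ((PySem.List.pyRange (m - 1) (-1) (-1)).foldl (fun (st : List (List Int) × Int) (j : Int) =>
          if PySem.List.pyGetD (PySem.List.pyGetD matrix i []) j "" == "#" then
            (PySem.List.pySetD st.1 i (PySem.List.pySetD (PySem.List.pyGetD st.1 i []) j (st.2 + 1)), st.2 + 1)
          else (st.1, 0)) (mr, (0 : Int))).1)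
      = (fun (mr : List (List Int)) (i : Int) => ((PySem.List.pyRange (m - 1) (-1) (-1)).foldl (mstep matrix i) (mr, 0)).1) from rfl]
  simp only [List.map_map]
  rw [← List.append_nil ((List.range n.toNat).map ((fun (_ : Int) => List.replicate m.toNat (0 : Int)) ∘ Int.ofNat))]
  rw [outer_fwd matrix m n.toNat ((fun (_ : Int) => List.replicate m.toNat (0 : Int)) ∘ Int.ofNat) [],
      outer_rev matrix m n.toNat ((fun (_ : Int) => List.replicate m.toNat (0 : Int)) ∘ Int.ofNat) []]
  rw [take_eq_map_range matrix n.toNat [] hNlen]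
  simp only [List.map_map, List.append_nil, Prod.mk.injEq, Function.comp_apply, fillRow_eq]
  refine ⟨?_, ?_⟩
  · apply List.map_congr_left
    intro k hk
    have hkN : k < n.toNat := List.mem_range.mp hk
    have hq : m.toNat ≤ (matrix.getD k []).length := hrowlen k hkN
    simp only [PySem.List.pyGetD_natCast, Function.comp_apply]
    rw [hrange m]
    rw [row_fwd (matrix.getD k []) m.toNat m.toNat le_rfl hq]
    simp
  · apply List.map_congr_left
    intro k hk
    have hkN : k < n.toNat := List.mem_range.mp hk
    have hq : m.toNat ≤ (matrix.getD k []).length := hrowlen k hkN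
    simp only [PySem.List.pyGetD_natCast, Function.comp_apply]
    rw [hrange2 m, List.range_eq_range']
    rw [row_bwd (matrix.getD k []) m.toNat hq m.toNat 0 (by omega)]
    simp
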